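-- pv_equiv track=rewrite | github.com/kaavyaMagesh/LeetCode | 2263-maximum-running-time-of-n-computers/maximum-running-time-of-n-computers.py | maxRunTime
-- ===== SOURCE A (Python) =====
-- def maxRunTime(n, batteries):
--     """
--     :type n: int
--     :type batteries: List[int]
--     :rtype: int
--     """
--     low = 0
--     high = sum(batteries) // n
--     ans = 0
--
--     while low <= high:
--         mid = (low + high) // 2
--         total = 0
--
--         for b in batteries:
--             total += min(b, mid)
--
--         if total >= n * mid:
--             ans = mid
--             low = mid + 1
--         else:
--             high = mid - 1
--
--     return ans
-- ===== SOURCE B (Python) =====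
-- def maxRunTime(n, batteries):
--     s = sorted(batteries)
--     pre = [0]
--     for b in s:
--         pre.append(pre[-1] + b)
--     m = len(s)
--
--     def capped(t):
--         # sum(min(b, t) for b in batteries), via the sorted order:
--         # elements below t contribute themselves (a prefix sum), the rest contribute t
--         lo, hi = 0, m
--         while lo < hi:
--             mid = (lo + hi) // 2
--             if s[mid] < t:
--                 lo = mid + 1
--             else:
--                 hi = mid
--         return pre[lo] + t * (m - lo)
--
--     low, high, ans = 0, pre[-1] // n, 0
--     while low <= high:
--         mid = (low + high) // 2
--         if capped(mid) >= n * mid: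
--             ans = mid
--             low = mid + 1
--         else:
--             high = mid - 1
--     return ans
-- ===== Notes on version B (the rewrite author's own statement) =====
-- stated objective: alternative
-- what changed: B keeps A's binary search over the answer but sorts the batteries once and builds prefix sums, so each feasibility probe computes sum(min(b,t)) by a log(m) bisection plus one prefix-sum lookup instead of rescanning all m batteries.
import Mathlib
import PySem

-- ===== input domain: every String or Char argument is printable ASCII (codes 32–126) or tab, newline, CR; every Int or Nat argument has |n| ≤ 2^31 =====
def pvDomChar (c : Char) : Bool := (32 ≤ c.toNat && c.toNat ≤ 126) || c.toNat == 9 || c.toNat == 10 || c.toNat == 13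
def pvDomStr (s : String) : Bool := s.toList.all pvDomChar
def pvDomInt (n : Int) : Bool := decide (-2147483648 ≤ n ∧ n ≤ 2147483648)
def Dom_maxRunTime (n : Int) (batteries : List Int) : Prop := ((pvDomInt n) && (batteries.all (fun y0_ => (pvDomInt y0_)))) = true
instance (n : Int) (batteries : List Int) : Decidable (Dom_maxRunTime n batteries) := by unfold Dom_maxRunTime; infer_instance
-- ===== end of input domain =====

-- B keeps A's binary search over the answer but replaces the rescan of all batteries at
-- every probe by a bisection plus a prefix-sum lookup on the sorted batteries (sort once,
-- then each probe avoids the full pass); objective: alternative inner mechanism.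

-- ===== PORT A =====
-- the while-loop of A; state (low, high, ans)
def maxRunTimeLoop (n : Int) (batteries : List Int) (low high ans : Int) : Int :=
  if _h : low ≤ high then
    let mid := PySem.Int.floordiv (low + high) 2
    let total := batteries.foldl (fun acc b => acc + min b mid) 0
    if total ≥ n * mid then maxRunTimeLoop n batteries (mid + 1) high mid
    else maxRunTimeLoop n batteries low (mid - 1) ans
  else ans
termination_by (high - low + 1).toNat
decreasing_by
  · have := PySem.Int.floordiv_two_mid_bounds _h
    omega
  · have := PySem.Int.floordiv_two_mid_bounds _h
    omega

def maxRunTime (n : Int) (batteries : List Int) : Int :=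
  maxRunTimeLoop n batteries 0 (PySem.Int.floordiv batteries.sum n) 0

-- ===== PORT B =====
-- the 'while lo < hi' loop inside B's capped(); the index mid always satisfies
-- 0 ≤ lo ≤ mid < hi ≤ len s, so the getD default of pyGetD is never taken
def bisectLoop (s : List Int) (t lo hi : Int) : Int :=
  if _h : lo < hi then
    let mid := PySem.Int.floordiv (lo + hi) 2
    if PySem.List.pyGetD s mid 0 < t then bisectLoop s t (mid + 1) hi
    else bisectLoop s t lo mid
  else lo
termination_by (hi - lo).toNat
decreasing_by
  · have h1 := PySem.Int.floordiv_two_mid_bounds (le_of_lt _h)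
    omega
  · have h2 : PySem.Int.floordiv (lo + hi) 2 < hi :=
      (PySem.Int.floordiv_lt_iff_lt_mul (by omega)).2 (by omega)
    omega

-- "pre = [0]; for b in s: pre.append(pre[-1] + b)"
def preList (s : List Int) : List Int :=
  s.foldl (fun pre b => pre ++ [PySem.List.pyGetD pre (-1) 0 + b]) [0]

-- B's capped(t): pre[lo] + t * (m - lo) after the bisection
def cappedSum (s pre : List Int) (m t : Int) : Int :=
  let lo := bisectLoop s t 0 m
  PySem.List.pyGetD pre lo 0 + t * (m - lo)

-- B's outer while-loop; state (low, high, ans)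
def maxRunTimeAltLoop (s pre : List Int) (m n low high ans : Int) : Int :=
  if _h : low ≤ high then
    let mid := PySem.Int.floordiv (low + high) 2
    if cappedSum s pre m mid ≥ n * mid then maxRunTimeAltLoop s pre m n (mid + 1) high mid
    else maxRunTimeAltLoop s pre m n low (mid - 1) ans
  else ans
termination_by (high - low + 1).toNat
decreasing_by
  · have := PySem.Int.floordiv_two_mid_bounds _h
    omega
  · have := PySem.Int.floordiv_two_mid_bounds _h
    omega

def maxRunTime_alt (n : Int) (batteries : List Int) : Int :=
  let s := PySem.List.sorted batteries (fun x => x) false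
  let pre := preList s
  let m : Int := (s.length : Int)
  maxRunTimeAltLoop s pre m n 0 (PySem.Int.floordiv (PySem.List.pyGetD pre (-1) 0) n) 0

-- ===== PRECONDITION & SPEC =====
-- A raises ZeroDivisionError exactly when n = 0 (the initial 'sum(batteries) // n'); so does B.
def Pre_maxRunTime (n : Int) (batteries : List Int) : Prop := n ≠ 0
instance (n : Int) (batteries : List Int) : Decidable (Pre_maxRunTime n batteries) := by
  unfold Pre_maxRunTime; infer_instance

def pvWitness_maxRunTime : Int × List Int := (2, [3, 4, 3])

def Spec_maxRunTime (n : Int) (batteries : List Int) (out : Int) : Prop := out = maxRunTime_alt n batteries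
instance (n : Int) (batteries : List Int) (out : Int) : Decidable (Spec_maxRunTime n batteries out) := by unfold Spec_maxRunTime; infer_instance

-- ===== CLAIM (what is proved, stated in full; the proofs are below) =====
def Claim_equal_maxRunTime : Prop := ∀ (n : Int) (batteries : List Int), Dom_maxRunTime n batteries → Pre_maxRunTime n batteries → Spec_maxRunTime n batteries (maxRunTime n batteries)

-- ===== LEMMAS AND PROOFS =====

-- Σ_{b ∈ bs} min(b, t)
def sumMin (bs : List Int) (t : Int) : Int := (bs.map (fun b => min b t)).sum

theorem sumMin_eq_sum_of_lt (bs : List Int) (t : Int) (h : ∀ b ∈ bs, b < t) :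
    sumMin bs t = bs.sum := by
  induction bs with
  | nil => simp [sumMin]
  | cons b rest ih =>
    have hb : b < t := h b List.mem_cons_self
    simp only [sumMin, List.map_cons, List.sum_cons] at *
    rw [ih (fun x hx => h x (List.mem_cons_of_mem _ hx)), min_eq_left (le_of_lt hb)]

theorem sumMin_eq_mul_of_ge (bs : List Int) (t : Int) (h : ∀ b ∈ bs, t ≤ b) :
    sumMin bs t = t * bs.length := by
  induction bs with
  | nil => simp [sumMin]
  | cons b rest ih =>
    have hb : t ≤ b := h b List.mem_cons_self
    simp only [sumMin, List.map_cons, List.sum_cons, List.length_cons] at *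
    rw [ih (fun x hx => h x (List.mem_cons_of_mem _ hx)), min_eq_right hb]
    push_cast
    ring

theorem sumMin_append (l1 l2 : List Int) (t : Int) :
    sumMin (l1 ++ l2) t = sumMin l1 t + sumMin l2 t := by
  simp [sumMin]

-- pyGetD at index -1 of a nonempty list is the last element read by getD
theorem pyGetD_neg_one (l : List Int) (h : l ≠ []) :
    PySem.List.pyGetD l (-1) 0 = l.getD (l.length - 1) 0 := by
  have hl : 0 < l.length := List.length_pos_iff.2 h
  simp only [PySem.List.pyGetD, PySem.List.pyGet?, PySem.List.pyIdx?]
  rw [if_neg (by omega), if_pos (by omega : -(l.length : Int) ≤ -1)]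
  simp [List.getD_eq_getElem?_getD]

-- preList builds the list of prefix sums of s
theorem preList_eq (s : List Int) :
    preList s = (List.range (s.length + 1)).map (fun k => (s.take k).sum) := by
  induction s using List.reverseRecOn with
  | nil => simp [preList]
  | append_singleton s b ih =>
    have hstep : preList (s ++ [b]) = preList s ++ [PySem.List.pyGetD (preList s) (-1) 0 + b] := by
      simp [preList, List.foldl_append]
    have hne : preList s ≠ [] := by
      rw [ih]; simp
    have hlast : PySem.List.pyGetD (preList s) (-1) 0 = s.sum := by
      rw [pyGetD_neg_one _ hne, ih]
      simp [List.getD_eq_getElem?_getD]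
    rw [hstep, hlast, ih]
    have hlen : (s ++ [b]).length + 1 = (s.length + 1) + 1 := by simp
    rw [hlen]
    conv_rhs => rw [List.range_succ, List.map_append]
    congr 1
    · apply List.map_congr_left
      intro k hk
      have hk' : k ≤ s.length := by
        have := List.mem_range.1 hk
        omega
      rw [List.take_append]
      have h0 : k - s.length = 0 := by omega
      rw [h0]
      simp
    · simp only [List.map_cons, List.map_nil]
      have hwhole : List.take (s.length + 1) (s ++ [b]) = s ++ [b] :=
        List.take_of_length_le (by simp)
      rw [hwhole]
      simp

theorem length_preList (s : List Int) : (preList s).length = s.length + 1 := by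
  rw [preList_eq]; simp

theorem pyGetD_preList (s : List Int) (k : Int) (h0 : 0 ≤ k) (h1 : k ≤ (s.length : Int)) :
    PySem.List.pyGetD (preList s) k 0 = (s.take k.toNat).sum := by
  have hk : k = (k.toNat : Int) := by omega
  rw [hk, PySem.List.pyGetD_natCast, preList_eq]
  have hlt : k.toNat < s.length + 1 := by omega
  simp [List.getD_eq_getElem?_getD, hlt]
  rw [max_eq_left h0]

theorem pyGetD_preList_last (s : List Int) : PySem.List.pyGetD (preList s) (-1) 0 = s.sum := by
  have hne : preList s ≠ [] := by
    rw [preList_eq]; simp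
  rw [pyGetD_neg_one _ hne, length_preList]
  rw [preList_eq]
  simp [List.getD_eq_getElem?_getD]

-- getD is monotone along a sorted list
theorem getD_mono (s : List Int) (hs : s.Pairwise (· ≤ ·)) (i j : Nat) (hij : i ≤ j)
    (hj : j < s.length) : s.getD i 0 ≤ s.getD j 0 := by
  rcases eq_or_lt_of_le hij with rfl | h
  · exact le_refl _
  · rw [List.getD_eq_getElem _ _ (lt_trans h hj), List.getD_eq_getElem _ _ hj]
    exact List.pairwise_iff_getElem.1 hs i j (lt_trans h hj) hj h

-- explicit unfolding of one step of the bisection loop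
theorem bisect_eq (s : List Int) (t lo hi : Int) :
    bisectLoop s t lo hi =
      if lo < hi then
        (if PySem.List.pyGetD s (PySem.Int.floordiv (lo + hi) 2) 0 < t
         then bisectLoop s t (PySem.Int.floordiv (lo + hi) 2 + 1) hi
         else bisectLoop s t lo (PySem.Int.floordiv (lo + hi) 2))
      else lo := by
  rw [bisectLoop]
  by_cases h : lo < hi
  · rw [dif_pos h, if_pos h]
  · rw [dif_neg h, if_neg h]

-- invariant of the bisection loop: it returns the count of elements < t (for sorted s)
theorem bisectLoop_spec (s : List Int) (t : Int) (hs : s.Pairwise (· ≤ ·)) :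
    ∀ (fuel : Nat) (lo hi : Int), (hi - lo).toNat ≤ fuel →
      0 ≤ lo → lo ≤ hi → hi ≤ (s.length : Int) →
      (∀ j : Nat, j < lo.toNat → s.getD j 0 < t) →
      (∀ j : Nat, hi.toNat ≤ j → j < s.length → ¬ s.getD j 0 < t) →
      0 ≤ bisectLoop s t lo hi ∧ bisectLoop s t lo hi ≤ (s.length : Int) ∧
        (∀ j : Nat, j < (bisectLoop s t lo hi).toNat → s.getD j 0 < t) ∧
        (∀ j : Nat, (bisectLoop s t lo hi).toNat ≤ j → j < s.length → ¬ s.getD j 0 < t) := by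
  intro fuel
  induction fuel with
  | zero =>
    intro lo hi hk h0 hlh hhi hlow hhigh
    have hnlt : ¬ lo < hi := by omega
    rw [bisect_eq, if_neg hnlt]
    refine ⟨h0, le_trans hlh hhi, hlow, fun j hj hjl => ?_⟩
    have : hi.toNat = lo.toNat := by omega
    exact hhigh j (by omega) hjl
  | succ fuel ih =>
    intro lo hi hk h0 hlh hhi hlow hhigh
    by_cases hlt : lo < hi
    · rw [bisect_eq, if_pos hlt]
      have hmid := PySem.Int.floordiv_two_mid_bounds (le_of_lt hlt)
      have hmidlt : PySem.Int.floordiv (lo + hi) 2 < hi :=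
        (PySem.Int.floordiv_lt_iff_lt_mul (by omega)).2 (by omega)
      set mid := PySem.Int.floordiv (lo + hi) 2 with hmiddef
      clear_value mid
      have hget : PySem.List.pyGetD s mid 0 = s.getD mid.toNat 0 := by
        rw [show mid = ((mid.toNat : Nat) : Int) by omega, PySem.List.pyGetD_natCast]
        simp [List.getD_eq_getElem?_getD]
        rw [max_eq_left (by omega : (0:Int) ≤ mid)]
      rw [hget]
      by_cases hc : s.getD mid.toNat 0 < t
      · rw [if_pos hc]
        apply ih (mid + 1) hi (by omega) (by omega) (by omega) hhi _ hhigh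
        intro j hj
        have hjm : j ≤ mid.toNat := by omega
        exact lt_of_le_of_lt (getD_mono s hs j mid.toNat hjm (by omega)) hc
      · rw [if_neg hc]
        apply ih lo mid (by omega) h0 (by omega) (by omega) hlow _
        intro j hj hjl hcj
        exact hc (lt_of_le_of_lt (getD_mono s hs mid.toNat j (by omega) hjl) hcj)
    · rw [bisect_eq, if_neg hlt]
      refine ⟨h0, le_trans hlh hhi, hlow, fun j hj hjl => ?_⟩
      have : hi.toNat = lo.toNat := by omega
      exact hhigh j (by omega) hjl

-- capped(t) computes sum(min(b, t) for b in s)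
theorem cappedSum_eq (s : List Int) (t : Int) (hs : s.Pairwise (· ≤ ·)) :
    cappedSum s (preList s) (s.length : Int) t = sumMin s t := by
  obtain ⟨h0, h1, hlt, hge⟩ := bisectLoop_spec s t hs ((s.length : Int) - 0).toNat 0
    (s.length : Int) (le_refl _) (le_refl 0) (by omega) (le_refl _)
    (fun j hj => absurd hj (by omega))
    (fun j hj hjl => absurd hjl (by omega))
  show PySem.List.pyGetD (preList s) (bisectLoop s t 0 (s.length : Int)) 0
      + t * ((s.length : Int) - bisectLoop s t 0 (s.length : Int)) = sumMin s t
  set r := bisectLoop s t 0 (s.length : Int) with hrdef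
  clear_value r
  rw [pyGetD_preList s r h0 h1]
  have hsplit : s.take r.toNat ++ s.drop r.toNat = s := List.take_append_drop r.toNat s
  conv_rhs => rw [← hsplit]
  rw [sumMin_append]
  have htake : sumMin (s.take r.toNat) t = (s.take r.toNat).sum := by
    apply sumMin_eq_sum_of_lt
    intro b hb
    obtain ⟨i, hi, rfl⟩ := List.getElem_of_mem hb
    rw [List.getElem_take]
    have hil : i < s.length := by
      have := hi
      simp at this
      omega
    rw [← List.getD_eq_getElem s 0 hil]
    apply hlt
    have := hi
    simp at this
    omega
  have hdrop : sumMin (s.drop r.toNat) t = t * (s.drop r.toNat).length := by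
    apply sumMin_eq_mul_of_ge
    intro b hb
    obtain ⟨i, hi, rfl⟩ := List.getElem_of_mem hb
    rw [List.getElem_drop]
    have hil : r.toNat + i < s.length := by
      have := hi
      simp at this
      omega
    rw [← List.getD_eq_getElem s 0 hil]
    have := hge (r.toNat + i) (by omega) hil
    omega
  rw [htake, hdrop]
  have hlen : ((s.drop r.toNat).length : Int) = (s.length : Int) - r := by
    simp
    omega
  rw [hlen]

-- explicit unfolding of one step of B's outer loop
theorem loopB_eq (s pre : List Int) (m n low high ans : Int) :
    maxRunTimeAltLoop s pre m n low high ans =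
      if low ≤ high then
        (if cappedSum s pre m (PySem.Int.floordiv (low + high) 2) ≥ n * PySem.Int.floordiv (low + high) 2
         then maxRunTimeAltLoop s pre m n (PySem.Int.floordiv (low + high) 2 + 1) high
                (PySem.Int.floordiv (low + high) 2)
         else maxRunTimeAltLoop s pre m n low (PySem.Int.floordiv (low + high) 2 - 1) ans)
      else ans := by
  rw [maxRunTimeAltLoop]
  by_cases h : low ≤ high
  · rw [dif_pos h, if_pos h]
  · rw [dif_neg h, if_neg h]

-- explicit unfolding of one step of A's loop
theorem loopA_eq (n : Int) (bs : List Int) (low high ans : Int) :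
    maxRunTimeLoop n bs low high ans =
      if low ≤ high then
        (if bs.foldl (fun acc b => acc + min b (PySem.Int.floordiv (low + high) 2)) 0
              ≥ n * PySem.Int.floordiv (low + high) 2
         then maxRunTimeLoop n bs (PySem.Int.floordiv (low + high) 2 + 1) high
                (PySem.Int.floordiv (low + high) 2)
         else maxRunTimeLoop n bs low (PySem.Int.floordiv (low + high) 2 - 1) ans)
      else ans := by
  rw [maxRunTimeLoop]
  by_cases h : low ≤ high
  · rw [dif_pos h, if_pos h]
  · rw [dif_neg h, if_neg h]

-- the two outer loops coincide step by step
theorem loops_eq (n : Int) (bs : List Int) :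
    ∀ (fuel : Nat) (low high ans : Int), (high - low + 1).toNat ≤ fuel →
      maxRunTimeAltLoop (PySem.List.sorted bs (fun x => x) false)
          (preList (PySem.List.sorted bs (fun x => x) false))
          (((PySem.List.sorted bs (fun x => x) false).length : Nat) : Int) n low high ans
        = maxRunTimeLoop n bs low high ans := by
  have hs : (PySem.List.sorted bs (fun x => x) false).Pairwise (· ≤ ·) := by
    have := PySem.List.sorted_pairwise bs (fun x => x)
    simpa using this
  have hperm := PySem.List.sorted_perm bs (fun x => x) false
  intro fuel
  induction fuel with
  | zero =>
    intro low high ans hk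
    have hnle : ¬ low ≤ high := by omega
    rw [loopA_eq, loopB_eq, if_neg hnle, if_neg hnle]
  | succ fuel ih =>
    intro low high ans hk
    by_cases hle : low ≤ high
    · rw [loopA_eq, loopB_eq, if_pos hle, if_pos hle]
      have hmid := PySem.Int.floordiv_two_mid_bounds hle
      set mid := PySem.Int.floordiv (low + high) 2 with hmiddef
      clear_value mid
      have hcond : cappedSum (PySem.List.sorted bs (fun x => x) false)
          (preList (PySem.List.sorted bs (fun x => x) false))
          (((PySem.List.sorted bs (fun x => x) false).length : Nat) : Int) mid
          = bs.foldl (fun acc b => acc + min b mid) 0 := by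
        rw [cappedSum_eq _ mid hs, PySem.List.foldl_add]
        have : ((PySem.List.sorted bs (fun x => x) false).map (fun b => min b mid)).sum
            = (bs.map (fun b => min b mid)).sum := (hperm.map (fun b => min b mid)).sum_eq
        simp [sumMin, this]
      rw [hcond]
      by_cases hc : bs.foldl (fun acc b => acc + min b mid) 0 ≥ n * mid
      · rw [if_pos hc, if_pos hc]
        exact ih (mid + 1) high mid (by omega)
      · rw [if_neg hc, if_neg hc]
        exact ih low (mid - 1) ans (by omega)
    · rw [loopA_eq, loopB_eq, if_neg hle, if_neg hle]

-- ===== VERDICT (by name: the statement is the Claim_ definition above) =====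
theorem maxRunTime_spec : Claim_equal_maxRunTime := by
  intro n batteries _hdom _hpre
  unfold Spec_maxRunTime
  have halt : maxRunTime_alt n batteries
      = maxRunTimeAltLoop (PySem.List.sorted batteries (fun x => x) false)
          (preList (PySem.List.sorted batteries (fun x => x) false))
          (((PySem.List.sorted batteries (fun x => x) false).length : Nat) : Int) n 0
          (PySem.Int.floordiv
            (PySem.List.pyGetD (preList (PySem.List.sorted batteries (fun x => x) false)) (-1) 0) n) 0 := rfl
  rw [halt, pyGetD_preList_last,
    (PySem.List.sorted_perm batteries (fun x => x) false).sum_eq,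
    loops_eq n batteries
      (PySem.Int.floordiv batteries.sum n - 0 + 1).toNat 0
      (PySem.Int.floordiv batteries.sum n) 0 (le_refl _)]
  rfl
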